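-- pv_equiv track=rewrite | github.com/kickoffqi/pipeline_scanner | web/routes/scan.py | _coerce_status_set
-- ===== SOURCE A (Python) =====
-- from typing import Any, Dict, List, Optional, Set
--
-- def _coerce_status_set(value: Any) -> Optional[Set[str]]:
--     """Normalize a user-provided status filter to an uppercase set.
--
--     Accepts:
--       - list[str] e.g. ["FAIL","WARN"]
--       - comma-separated string e.g. "fail,warn"
--     """
--     if value is None:
--         return None
--     if isinstance(value, str):
--         parts = [p.strip().upper() for p in value.split(",") if p.strip()]
--         return set(parts) if parts else None
--     if isinstance(value, list):
--         parts: List[str] = []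
--         for x in value:
--             if isinstance(x, str):
--                 parts.append(x.strip().upper())
--         return set([p for p in parts if p]) if parts else None
--     return None
-- ===== SOURCE B (Python) =====
-- def _coerce_status_set(value):
--     if value is None:
--         return None
--     if isinstance(value, str):
--         # character-level tokenizer: one pass over the characters with a
--         # sentinel comma; no split()/comprehension pipeline at all
--         result = set()
--         token = ""
--         for ch in value + ",":
--             if ch == ",":
--                 t = token.strip().upper()
--                 if t:
--                     result.add(t)
--                 token = ""
--             else:
--                 token += ch
--         return result if result else None
--     if isinstance(value, list):
--         # single pass with a 'saw a string' flag instead of A's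
--         # build-then-filter two-stage list pipeline
--         result = set()
--         seen = False
--         for x in value:
--             if isinstance(x, str):
--                 seen = True
--                 t = x.strip().upper()
--                 if t:
--                     result.add(t)
--         return result if seen else None
--     return None
-- ===== Notes on version B (the rewrite author's own statement) =====
-- stated objective: alternative
-- what changed: The string branch is rewritten as a single character-level tokenizer (explicit token accumulator, flush on a sentinel comma, normalize-on-flush) instead of A's split-then-comprehension pipeline, and the list branch becomes one pass with a seen-flag instead of A's build-then-filter two-stage pipeline.
import Mathlib
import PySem

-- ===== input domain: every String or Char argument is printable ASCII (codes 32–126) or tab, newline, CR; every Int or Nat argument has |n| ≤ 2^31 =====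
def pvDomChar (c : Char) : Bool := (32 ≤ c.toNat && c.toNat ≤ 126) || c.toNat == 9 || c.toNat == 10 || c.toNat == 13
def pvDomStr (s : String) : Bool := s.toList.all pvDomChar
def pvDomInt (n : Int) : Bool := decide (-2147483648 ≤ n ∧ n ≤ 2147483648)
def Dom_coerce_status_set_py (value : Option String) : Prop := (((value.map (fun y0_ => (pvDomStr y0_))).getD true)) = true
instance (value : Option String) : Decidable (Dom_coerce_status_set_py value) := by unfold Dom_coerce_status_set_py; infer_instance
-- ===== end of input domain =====

-- B replaces A's split-then-comprehension pipeline by a single character-level tokenizer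
-- (token accumulator, flush on a sentinel comma) — objective: alternative structure, same cost.
-- The Lean argument type Option String covers A's None and str cases; A's list branch
-- is not representable here and nothing is claimed about it.

-- ===== PORT A =====
-- value.split(",") with the literal nonempty separator ",": PySem.Str.split? is some here, .getD [] is exact.
def coerce_status_set_py (value : Option String) : Option (List String) :=
  match value with
  | none => none
  | some s =>
    let parts : List String :=
      (((PySem.Str.split? s ",").getD []).filter (fun p => PySem.Str.strip p != "")).map
        (fun p => PySem.Str.upper (PySem.Str.strip p))
    if parts = [] then none else some (PySem.Set.ofList parts)

-- ===== PORT B =====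
-- Source B's flush step: t = token.strip().upper(); if t: result.add(t)
def coerce_flush (res : List String) (tok : List Char) : List String :=
  let t := PySem.Str.upper (PySem.Str.strip (String.ofList tok))
  if t = "" then res else PySem.Set.add res t

-- Source B's string branch: one pass over the characters of value + "," with a token accumulator
def coerce_status_set_py_alt (value : Option String) : Option (List String) :=
  match value with
  | none => none
  | some s =>
    let st := (s.toList ++ [',']).foldl
      (fun st c =>
        if c = ',' then (coerce_flush st.1 st.2, ([] : List Char))
        else (st.1, st.2 ++ [c]))
      (PySem.Set.empty, ([] : List Char))
    if st.1 = [] then none else some st.1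

-- ===== PRECONDITION & SPEC =====
def Spec_coerce_status_set_py (value : Option String) (out : Option (List String)) : Prop := out = coerce_status_set_py_alt value
instance (value : Option String) (out : Option (List String)) : Decidable (Spec_coerce_status_set_py value out) := by unfold Spec_coerce_status_set_py; infer_instance

-- ===== CLAIM =====
def Claim_equal_coerce_status_set_py : Prop := ∀ (value : Option String), Dom_coerce_status_set_py value → Spec_coerce_status_set_py value (coerce_status_set_py value)

-- ===== LEMMAS AND PROOFS =====

-- proof-only model of splitting on a single comma
def charSplit : List Char → List (List Char)
  | [] => [[]]
  | c :: cs => if c = ',' then [] :: charSplit cs else (charSplit cs).modifyHead (c :: ·)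

def consHead (pre : List Char) : List (List Char) → List (List Char)
  | [] => [pre]
  | h :: t => (pre ++ h) :: t

lemma charSplit_ne_nil (cs : List Char) : charSplit cs ≠ [] := by
  induction cs with
  | nil => simp [charSplit]
  | cons c cs ih =>
    simp only [charSplit]
    split
    · simp
    · cases h : charSplit cs with
      | nil => exact absurd h ih
      | cons a t => simp

lemma splitOn_go_eq (fuel : Nat) (l cur : List Char) (acc : List (List Char))
    (h : l.length < fuel) :
    PySem.Chars.splitOn.go [','] fuel l cur acc
      = acc.reverse ++ consHead cur.reverse (charSplit l) := by
  induction fuel generalizing l cur acc with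
  | zero => omega
  | succ f ih =>
    cases l with
    | nil =>
      simp [PySem.Chars.splitOn.go, charSplit, consHead]
    | cons c rest =>
      by_cases hc : c = ','
      · subst hc
        have hpre : [','].isPrefixOf (',' :: rest) = true := by simp [List.isPrefixOf]
        simp only [PySem.Chars.splitOn.go, hpre, if_true, List.length_nil, List.length_cons,
          Nat.zero_add, List.drop_succ_cons, List.drop_zero]
        rw [ih rest [] (cur.reverse :: acc) (by simpa using Nat.lt_of_succ_lt_succ h)]
        simp [charSplit]
        cases hcs : charSplit rest with
        | nil => exact absurd hcs (charSplit_ne_nil rest)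
        | cons a t => simp [consHead]
      · have hpre : [','].isPrefixOf (c :: rest) = false := by
          simp only [List.isPrefixOf, Bool.and_true]
          exact decide_eq_false (fun h' => hc h'.symm)
        simp only [PySem.Chars.splitOn.go, hpre]
        rw [ih rest (c :: cur) acc (by simpa using Nat.lt_of_succ_lt_succ h)]
        simp only [charSplit, hc, List.reverse_cons]
        cases hcs : charSplit rest with
        | nil => exact absurd hcs (charSplit_ne_nil rest)
        | cons a t => simp [consHead]

lemma splitOn_comma (cs : List Char) :
    PySem.Chars.splitOn cs [','] = charSplit cs := by
  unfold PySem.Chars.splitOn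
  rw [splitOn_go_eq (cs.length + 1) cs [] [] (by omega)]
  cases hcs : charSplit cs with
  | nil => exact absurd hcs (charSplit_ne_nil cs)
  | cons a t => simp [consHead]

-- fold the flush over a list of tokens
def procTokens (res : List String) (toks : List (List Char)) : List String :=
  toks.foldl coerce_flush res

-- B's tokenizer over cs ++ [','] flushes exactly the tokens of charSplit cs
lemma tokenizer_eq (cs : List Char) : ∀ (res : List String) (tok : List Char),
    (cs ++ [',']).foldl
      (fun st c =>
        if c = ',' then (coerce_flush st.1 st.2, ([] : List Char))
        else (st.1, st.2 ++ [c]))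
      (res, tok)
      = (procTokens res (consHead tok (charSplit cs)), ([] : List Char)) := by
  induction cs with
  | nil =>
    intro res tok
    simp [charSplit, consHead, procTokens]
  | cons c cs ih =>
    intro res tok
    by_cases hc : c = ','
    · subst hc
      simp only [List.cons_append, List.foldl_cons, if_true]
      rw [ih (coerce_flush res tok) []]
      simp only [charSplit, if_true]
      cases hcs : charSplit cs with
      | nil => exact absurd hcs (charSplit_ne_nil cs)
      | cons a t => simp [consHead, procTokens]
    · simp only [List.cons_append, List.foldl_cons, hc, if_false]
      rw [ih res (tok ++ [c])]
      simp only [charSplit, if_neg hc]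
      cases hcs : charSplit cs with
      | nil => exact absurd hcs (charSplit_ne_nil cs)
      | cons a t => simp [consHead]

-- upper of a string is empty iff the string is (upper is a character map)
lemma upper_eq_empty_iff (t : String) : PySem.Str.upper t = "" ↔ t = "" := by
  constructor
  · intro h
    have h' : (PySem.Str.upper t).toList = ("" : String).toList := by rw [h]
    simp [PySem.Str.toList_upper, PySem.Chars.upper] at h'
    simpa using h'
  · intro h; subst h; rfl


-- flushing the toLists of a string list is A's filter-map fold of Set.add
lemma procTokens_eq (L : List String) : ∀ (res : List String),
    procTokens res (L.map String.toList)
      = ((L.filter (fun p => PySem.Str.strip p != "")).map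
          (fun p => PySem.Str.upper (PySem.Str.strip p))).foldl PySem.Set.add res := by
  induction L with
  | nil => intro res; rfl
  | cons t L ih =>
    intro res
    simp only [List.map_cons, procTokens, List.foldl_cons, List.filter_cons]
    by_cases h : PySem.Str.strip t = ""
    · have hb : (PySem.Str.strip t != "") = false := by simp [h]
      have hu : PySem.Str.upper (PySem.Str.strip (String.ofList t.toList)) = "" := by
        rw [String.ofList_toList, h]; rfl
      rw [hb]
      simp only [coerce_flush, hu, if_true]
      exact ih res
    · have hb : (PySem.Str.strip t != "") = true := by simp [h]
      rw [hb]
      have hcf : coerce_flush res t.toList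
          = PySem.Set.add res (PySem.Str.upper (PySem.Str.strip t)) := by
        simp only [coerce_flush, String.ofList_toList]
        rw [if_neg (fun hx => h ((upper_eq_empty_iff _).1 hx))]
      rw [hcf]
      exact ih (PySem.Set.add res (PySem.Str.upper (PySem.Str.strip t)))

-- a set built from a nonempty list is nonempty
lemma ofList_ne_nil {xs : List String} (h : xs ≠ []) :
    xs.foldl PySem.Set.add PySem.Set.empty ≠ [] := by
  intro hnil
  obtain ⟨x, hx⟩ := List.exists_mem_of_ne_nil xs h
  have hmem : x ∈ PySem.Set.ofList xs := (PySem.Set.mem_ofList xs x).2 hx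
  rw [PySem.Set.ofList_eq_foldl] at hmem
  have hx2 : x ∈ ([] : List String) := by rw [← hnil]; exact hmem
  exact absurd hx2 (List.not_mem_nil)

-- split? s "," returns some L with L.map toList = charSplit s.toList
lemma split_comma_eq (s : String) :
    ∃ L, PySem.Str.split? s "," = some L ∧ L.map String.toList = charSplit s.toList := by
  have h := PySem.Str.split?_map s ","
  have hsep : ("," : String).toList = [','] := rfl
  rw [hsep] at h
  have h2 : PySem.Chars.split? s.toList [','] = some (charSplit s.toList) := by
    simp [PySem.Chars.split?, splitOn_comma]
  rw [h2] at h
  cases hL : PySem.Str.split? s "," with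
  | none => rw [hL] at h; simp at h
  | some L =>
    rw [hL] at h
    simp only [Option.map_some] at h
    exact ⟨L, rfl, by injection h⟩

-- ===== VERDICT =====
theorem coerce_status_set_py_spec : Claim_equal_coerce_status_set_py := by
  intro value _
  unfold Spec_coerce_status_set_py coerce_status_set_py coerce_status_set_py_alt
  cases value with
  | none => rfl
  | some s =>
    simp only
    obtain ⟨L, hL, hLmap⟩ := split_comma_eq s
    rw [hL]
    rw [tokenizer_eq s.toList PySem.Set.empty []]
    have hcons : consHead [] (charSplit s.toList) = charSplit s.toList := by
      cases hcs : charSplit s.toList with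
      | nil => exact absurd hcs (charSplit_ne_nil s.toList)
      | cons a t => rfl
    rw [hcons, ← hLmap, procTokens_eq L PySem.Set.empty]
    simp only [Option.getD_some]
    set parts := (L.filter (fun p => PySem.Str.strip p != "")).map
      (fun p => PySem.Str.upper (PySem.Str.strip p)) with hparts
    by_cases hp : parts = []
    · simp [hp, PySem.Set.empty]
    · have h1 : parts.foldl PySem.Set.add PySem.Set.empty ≠ [] := ofList_ne_nil hp
      rw [if_neg hp, if_neg h1, PySem.Set.ofList_eq_foldl]
      rfl
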